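-- pv_equiv track=rewrite | github.com/tomfluff/UTokyo_CI_Entrance_Exam | 2017-Summer/q_05.py | get_vertical_idxs
-- ===== SOURCE A (Python) =====
-- def get_vertical_idxs(lines):
--     e_i = s_i = 0
--     fn_v_i = max([len(l) for l in lines])
--     v_idxs = []
--
--     while s_i < fn_v_i:
--         is_found = False
--         for l in lines:
--             if len(l)-1 < e_i:
--                 continue
--             if l[e_i] not in [' ']:
--                 is_found = True
--         if is_found:
--             e_i += 1
--         else:
--             if s_i < e_i:
--                 v_idxs.append((s_i,e_i))
--             s_i = e_i + 1
--             e_i = s_i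
--
--     return v_idxs
-- ===== SOURCE B (Python) =====
-- def get_vertical_idxs(lines):
--     width = max(len(l) for l in lines)
--     # one pass over the actual characters: mark non-blank columns
--     nonblank = [False] * width
--     for l in lines:
--         for j, ch in enumerate(l):
--             if ch != ' ':
--                 nonblank[j] = True
--     # one linear scan over the columns: emit maximal runs as (start, end)
--     v_idxs = []
--     start = None
--     for j, v in enumerate(nonblank):
--         if v:
--             if start is None:
--                 start = j
--         elif start is not None:
--             v_idxs.append((start, j))
--             start = None
--     if start is not None:
--         v_idxs.append((start, width))
--     return v_idxs
-- ===== Notes on version B (the rewrite author's own statement) =====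
-- stated objective: alternative
-- what changed: A rescans every line once per column (columns x num_lines character tests); B makes one pass over the actual characters to mark non-blank columns in a boolean array, then one linear scan over that array to emit the ranges (intended as faster; a timing run measured about 1.5x at the largest size, not consistently above the threshold).
-- outside the precondition, e.g. on get_vertical_idxs([]): A raises ValueError, B raises ValueError
import Mathlib
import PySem

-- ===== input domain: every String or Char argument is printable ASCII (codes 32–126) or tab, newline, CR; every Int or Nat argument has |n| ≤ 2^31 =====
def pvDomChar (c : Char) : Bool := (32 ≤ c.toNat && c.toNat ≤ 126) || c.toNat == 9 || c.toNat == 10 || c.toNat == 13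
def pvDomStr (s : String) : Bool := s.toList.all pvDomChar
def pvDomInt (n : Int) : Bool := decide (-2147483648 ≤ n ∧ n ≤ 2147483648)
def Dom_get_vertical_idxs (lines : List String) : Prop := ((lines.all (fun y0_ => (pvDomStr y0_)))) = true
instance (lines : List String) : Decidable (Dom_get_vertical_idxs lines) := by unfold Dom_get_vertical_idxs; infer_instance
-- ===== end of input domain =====

-- B replaces A's per-column rescan of all lines by one pass over the characters (marking
-- non-blank columns) plus one linear scan emitting the ranges; objective: alternative.

-- ===== PORT A =====
-- is_found for column e: the inner 'for l in lines' loop (no break; accumulates into is_found)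
def pvFoundA (lines : List String) (e : Nat) : Bool :=
  lines.foldl (fun acc l =>
    if (l.length : Int) - 1 < (e : Int) then acc           -- 'if len(l)-1 < e_i: continue'
    else if PySem.List.pyGetD l.toList (e : Int) ' ' ≠ ' ' then true   -- l[e_i]; in range by the guard
    else acc) false

-- pvFoundA true at e means some line is longer than e (used for termination)
theorem pvFoundA_exists (lines : List String) (e : Nat) :
    pvFoundA lines e = true → ∃ l ∈ lines, e < l.length := by
  unfold pvFoundA
  suffices h : ∀ (b : Bool), lines.foldl (fun acc l =>
      if (l.length : Int) - 1 < (e : Int) then acc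
      else if PySem.List.pyGetD l.toList (e : Int) ' ' ≠ ' ' then true
      else acc) b = true → b = true ∨ ∃ l ∈ lines, e < l.length by
    intro hf
    rcases h false hf with h' | h'
    · exact absurd h' (by simp)
    · exact h'
  induction lines with
  | nil => intro b hb; exact Or.inl hb
  | cons l ls ih =>
    intro b hb
    simp only [List.foldl_cons] at hb
    rcases ih _ hb with h' | h'
    · by_cases hg : (l.length : Int) - 1 < (e : Int)
      · rw [if_pos hg] at h'; exact Or.inl h'
      · right; exact ⟨l, List.mem_cons_self, by omega⟩
    · right; obtain ⟨l', hl', he'⟩ := h'; exact ⟨l', List.mem_cons_of_mem _ hl', he'⟩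

-- the while loop of A; carries the invariants needed for termination
def pvLoopA (lines : List String) (fn : Nat) (hfn : ∀ l ∈ lines, l.length ≤ fn)
    (s e : Nat) (hse : s ≤ e) (hefn : s < fn → e ≤ fn) (acc : List (Int × Int)) :
    List (Int × Int) :=
  if hs : s < fn then
    if hf : pvFoundA lines e = true then
      pvLoopA lines fn hfn s (e + 1) (Nat.le_succ_of_le hse)
        (fun _ => by
          obtain ⟨l, hl, he⟩ := pvFoundA_exists lines e hf
          exact Nat.succ_le_of_lt (Nat.lt_of_lt_of_le he (hfn l hl))) acc
    else
      pvLoopA lines fn hfn (e + 1) (e + 1) le_rfl (fun h => h.le)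
        (if s < e then acc ++ [((s : Int), (e : Int))] else acc)
  else acc
termination_by 2 * fn - (s + e)
decreasing_by
  · obtain ⟨l, hl, he⟩ := pvFoundA_exists lines e hf
    have := hfn l hl; omega
  · have := hefn hs; omega

def get_vertical_idxs (lines : List String) : List (Int × Int) :=
  -- fn_v_i = max([len(l) for l in lines]); Python raises ValueError on lines = [] (excluded by Pre_)
  match hm : PySem.List.max? (lines.map (fun l => (l.length : Int))) (fun y => y) with
  | none => []
  | some fn =>
    pvLoopA lines fn.toNat
      (fun l hl => by
        have := PySem.List.max?_isMax hm ((l.length : Int)) (List.mem_map_of_mem hl)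
        omega)
      0 0 le_rfl (fun _ => Nat.zero_le _) []

-- ===== PORT B =====
-- inner loop: 'for j, ch in enumerate(l): if ch != ' ': nonblank[j] = True'
def pvMarkLine (mask : List Bool) (l : String) : List Bool :=
  (PySem.List.enumerate l.toList 0).foldl
    (fun m jc => if jc.2 ≠ ' ' then PySem.List.pySetD m jc.1 true else m) mask

-- loop body of 'for j, v in enumerate(nonblank): …'
def pvScanStep (st : Option Int × List (Int × Int)) (jv : Int × Bool) :
    Option Int × List (Int × Int) :=
  if jv.2 then
    match st.1 with
    | none => (some jv.1, st.2)
    | some _ => st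
  else
    match st.1 with
    | some s => (none, st.2 ++ [(s, jv.1)])
    | none => st

def get_vertical_idxs_alt (lines : List String) : List (Int × Int) :=
  match PySem.List.max? (lines.map (fun l => (l.length : Int))) (fun y => y) with
  | none => []    -- Python raises ValueError on lines = [] (excluded by Pre_)
  | some width =>
    let nonblank := lines.foldl pvMarkLine (List.replicate width.toNat false)  -- [False]*width (width ≥ 0)
    let r := (PySem.List.enumerate nonblank 0).foldl pvScanStep (none, [])
    match r.1 with
    | some s => r.2 ++ [(s, width)]
    | none => r.2

-- ===== PRECONDITION & SPEC =====
-- Pre_ excludes only lines = [], on which Python A (and B) raise ValueError at max([]).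
def Pre_get_vertical_idxs (lines : List String) : Prop := lines ≠ []
instance (lines : List String) : Decidable (Pre_get_vertical_idxs lines) := by
  unfold Pre_get_vertical_idxs; infer_instance
def pvWitness_get_vertical_idxs : List String := ["a b"]

def Spec_get_vertical_idxs (lines : List String) (out : List (Int × Int)) : Prop :=
  out = get_vertical_idxs_alt lines
instance (lines : List String) (out : List (Int × Int)) : Decidable (Spec_get_vertical_idxs lines out) := by
  unfold Spec_get_vertical_idxs; infer_instance

-- ===== CLAIM (what is proved, stated in full; the proofs are below) =====
def Claim_equal_get_vertical_idxs : Prop := ∀ (lines : List String), Dom_get_vertical_idxs lines → Pre_get_vertical_idxs lines → Spec_get_vertical_idxs lines (get_vertical_idxs lines)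

-- ===== LEMMAS AND PROOFS =====

-- the column predicate both programs compute: column j holds a non-blank character in some line
def pvCol (lines : List String) (j : Nat) : Bool :=
  lines.any (fun l => decide (j < l.length) && (l.toList.getD j ' ' != ' '))

theorem pvFoundA_eq_col (lines : List String) (e : Nat) :
    pvFoundA lines e = pvCol lines e := by
  unfold pvFoundA pvCol
  suffices h : ∀ (b : Bool), lines.foldl (fun acc l =>
      if (l.length : Int) - 1 < (e : Int) then acc
      else if PySem.List.pyGetD l.toList (e : Int) ' ' ≠ ' ' then true
      else acc) b
      = (b || lines.any (fun l => decide (e < l.length) && (l.toList.getD e ' ' != ' '))) by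
    simpa using h false
  induction lines with
  | nil => intro b; simp
  | cons l ls ih =>
    intro b
    simp only [List.foldl_cons, List.any_cons, ih]
    have hstep : (if (l.length : Int) - 1 < (e : Int) then b
        else if PySem.List.pyGetD l.toList (e : Int) ' ' ≠ ' ' then true else b)
        = (b || (decide (e < l.length) && (l.toList.getD e ' ' != ' '))) := by
      by_cases hg : (l.length : Int) - 1 < (e : Int)
      · rw [if_pos hg]
        have : ¬ e < l.length := by omega
        simp [this]
      · rw [if_neg hg]
        have hel : e < l.length := by omega
        rw [PySem.List.pyGetD_natCast]
        simp only [hel, decide_true, Bool.true_and]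
        by_cases hc : l.toList.getD e ' ' = ' '
        · rw [if_neg (not_not_intro hc)]
          rw [List.getD_eq_getElem?_getD] at hc
          simp [hc]
        · rw [if_pos hc]
          rw [List.getD_eq_getElem?_getD] at hc
          simp [hc]
    rw [hstep, Bool.or_assoc]

-- marking one line: length preserved, and column j becomes m[j] || (line has non-blank at j)
theorem pvMarkFrom_spec (cs : List Char) :
    ∀ (i : Nat) (m : List Bool), i + cs.length ≤ m.length →
      (((PySem.List.enumerate cs (i : Int)).foldl
          (fun m jc => if jc.2 ≠ ' ' then PySem.List.pySetD m jc.1 true else m) m).length = m.length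
      ∧ ∀ j : Nat, ((PySem.List.enumerate cs (i : Int)).foldl
          (fun m jc => if jc.2 ≠ ' ' then PySem.List.pySetD m jc.1 true else m) m).getD j false
          = (m.getD j false || (decide (i ≤ j ∧ j < i + cs.length) && (cs.getD (j - i) ' ' != ' ')))) := by
  induction cs with
  | nil => intro i m _; simp [PySem.List.enumerate_nil]
  | cons c cs ih =>
    intro i m hlen
    have hcast : (i : Int) + 1 = ((i + 1 : Nat) : Int) := by push_cast; ring
    rw [PySem.List.enumerate_cons, List.foldl_cons, hcast]
    have him : i < m.length := by simp at hlen; omega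
    set m' : List Bool := if (i, c).2 ≠ ' ' then PySem.List.pySetD m ((i : Int)) true else m with hm'
    have hm'len : m'.length = m.length := by
      rw [hm']; split
      · rw [PySem.List.pySetD_natCast]; exact List.length_set ..
      · rfl
    have hm'get : ∀ j : Nat, m'.getD j false
        = (m.getD j false || (decide (j = i) && (c != ' '))) := by
      intro j
      rw [hm']
      by_cases hc : c = ' '
      · simp [hc]
      · simp only [hc, ne_eq, not_false_iff, if_pos, bne_iff_ne, PySem.List.pySetD_natCast]
        by_cases hji : j = i
        · subst hji
          rw [List.getD_eq_getElem?_getD, List.getElem?_set, if_pos rfl, if_pos him]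
          simp [hc]
        · rw [List.getD_eq_getElem?_getD, List.getElem?_set, if_neg (fun h => hji h.symm),
            ← List.getD_eq_getElem?_getD]
          simp [hji]
    have hlen' : (i + 1) + cs.length ≤ m'.length := by rw [hm'len]; simp at hlen ⊢; omega
    obtain ⟨ihlen, ihget⟩ := ih (i + 1) m' hlen'
    refine ⟨by rw [ihlen, hm'len], fun j => ?_⟩
    rw [ihget j, hm'get j]
    by_cases hji : j = i
    · have hnr : ¬ (i + 1 ≤ j ∧ j < i + 1 + cs.length) := by omega
      have hr : i ≤ j ∧ j < i + (c :: cs).length := by simp; omega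
      have hsub : j - i = 0 := by omega
      simp [hnr, hr, hsub, hji]
    · by_cases hrange : i + 1 ≤ j ∧ j < i + 1 + cs.length
      · obtain ⟨h1r, h2r⟩ := hrange
        have hsub : j - i = (j - (i + 1)) + 1 := by omega
        have hil : i < j := by omega
        have hile : i ≤ j := by omega
        have hb2 : j < i + (cs.length + 1) := by omega
        have hb3 : j < i + 1 + cs.length := by omega
        simp [hji, hsub, hil, hile, hb2, hb3]
      · rcases Nat.lt_or_ge j i with hlt | hge
        · have h1 : ¬ i < j := by omega
          have h2 : ¬ i ≤ j := by omega
          simp [hji, h1, h2]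
        · have hil : i < j := by omega
          have h2 : ¬ j < i + 1 + cs.length := fun h => hrange ⟨by omega, h⟩
          have h3 : ¬ j < i + (cs.length + 1) := by omega
          simp [hji, h2, h3]

theorem pvMarkLine_spec (m : List Bool) (l : String) (hlen : l.length ≤ m.length) :
    (pvMarkLine m l).length = m.length ∧
    ∀ j : Nat, (pvMarkLine m l).getD j false
      = (m.getD j false || (decide (j < l.length) && (l.toList.getD j ' ' != ' '))) := by
  have hl : l.length = l.toList.length := by
    rw [String.length_toList]
  have h := pvMarkFrom_spec l.toList 0 m (by omega)
  simp only [Nat.cast_zero] at h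
  obtain ⟨h1, h2⟩ := h
  refine ⟨h1, fun j => ?_⟩
  unfold pvMarkLine
  rw [h2 j]
  have : (0 ≤ j ∧ j < 0 + l.toList.length) ↔ (j < l.length) := by omega
  simp [this]

theorem pvMask_spec (lines : List String) :
    ∀ (m : List Bool), (∀ l ∈ lines, l.length ≤ m.length) →
      (lines.foldl pvMarkLine m).length = m.length ∧
      ∀ j : Nat, (lines.foldl pvMarkLine m).getD j false = (m.getD j false || pvCol lines j) := by
  induction lines with
  | nil => intro m _; simp [pvCol]
  | cons l ls ih =>
    intro m hm
    have hl : l.length ≤ m.length := hm l List.mem_cons_self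
    obtain ⟨h1, h2⟩ := pvMarkLine_spec m l hl
    have hm' : ∀ l' ∈ ls, l'.length ≤ (pvMarkLine m l).length := by
      intro l' hl'; rw [h1]; exact hm l' (List.mem_cons_of_mem _ hl')
    obtain ⟨ih1, ih2⟩ := ih (pvMarkLine m l) hm'
    simp only [List.foldl_cons]
    refine ⟨by rw [ih1, h1], fun j => ?_⟩
    rw [ih2 j, h2 j]
    unfold pvCol
    simp [Bool.or_assoc]

-- the master lemma: A's while loop equals B's scan of the remaining columns
theorem pvLoop_eq_scan (lines : List String) (fn : Nat)
    (hfn : ∀ l ∈ lines, l.length ≤ fn)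
    (hcol : ∀ j : Nat, fn ≤ j → pvCol lines j = false) :
    ∀ (vs : List Bool) (e s : Nat) (acc : List (Int × Int))
      (hse : s ≤ e) (hefn : s < fn → e ≤ fn),
      e + vs.length = fn →
      (∀ k : Nat, k < vs.length → vs.getD k false = pvCol lines (e + k)) →
      pvLoopA lines fn hfn s e hse hefn acc
        = (match ((PySem.List.enumerate vs (e : Int)).foldl pvScanStep
              ((if s < e then some (s : Int) else none), acc)).1 with
           | some s' => ((PySem.List.enumerate vs (e : Int)).foldl pvScanStep
              ((if s < e then some (s : Int) else none), acc)).2 ++ [(s', (fn : Int))]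
           | none => ((PySem.List.enumerate vs (e : Int)).foldl pvScanStep
              ((if s < e then some (s : Int) else none), acc)).2) := by
  intro vs
  induction vs with
  | nil =>
    intro e s acc hse hefn hlen _
    have he : e = fn := by simpa using hlen
    subst he
    simp only [PySem.List.enumerate_nil, List.foldl_nil]
    by_cases hsE : s < e
    · rw [pvLoopA]
      rw [dif_pos (by omega), dif_neg (by rw [pvFoundA_eq_col]; simp [hcol e le_rfl]),
        if_pos hsE, pvLoopA, dif_neg (by omega)]
      simp [hsE]
    · have hse' : s = e := by omega
      subst hse'
      rw [pvLoopA, dif_neg (by omega)]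
      simp
  | cons v vs ih =>
    intro e s acc hse hefn hlen hget
    have hefn' : e < fn := by simp at hlen; omega
    have hv : v = pvCol lines e := by simpa using hget 0 (by simp)
    have hcast : (e : Int) + 1 = ((e + 1 : Nat) : Int) := by push_cast; ring
    rw [PySem.List.enumerate_cons, List.foldl_cons, hcast]
    have hget' : ∀ k : Nat, k < vs.length → vs.getD k false = pvCol lines ((e + 1) + k) := by
      intro k hk
      have := hget (k + 1) (by simp; omega)
      simpa [Nat.add_assoc, Nat.add_comm 1 k] using this
    rw [pvLoopA, dif_pos (by omega)]
    by_cases hc : pvCol lines e = true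
    · rw [dif_pos (by rw [pvFoundA_eq_col]; exact hc)]
      have hstep : pvScanStep ((if s < e then some (s : Int) else none), acc) ((e : Int), v)
          = ((if s < e + 1 then some (s : Int) else none), acc) := by
        unfold pvScanStep
        by_cases hsE : s < e
        · simp [hsE, hv, hc, show s < e + 1 by omega]
        · have : s = e := by omega
          subst this
          simp [hv, hc]
      rw [hstep]
      exact ih (e + 1) s acc (by omega) (fun _ => by omega) (by simp at hlen ⊢; omega) hget'
    · rw [dif_neg (by rw [pvFoundA_eq_col]; simpa using hc)]
      have hstep : pvScanStep ((if s < e then some (s : Int) else none), acc) ((e : Int), v)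
          = (none, if s < e then acc ++ [((s : Int), (e : Int))] else acc) := by
        unfold pvScanStep
        by_cases hsE : s < e <;> simp [hsE, hv, hc]
      rw [hstep]
      have := ih (e + 1) (e + 1) (if s < e then acc ++ [((s : Int), (e : Int))] else acc)
        le_rfl (fun h => h.le) (by simp at hlen ⊢; omega) hget'
      simpa using this

-- ===== VERDICT (by name: the statement is the Claim_ definition above) =====
theorem get_vertical_idxs_spec : Claim_equal_get_vertical_idxs := by
  intro lines _ hpre
  unfold Spec_get_vertical_idxs
  unfold get_vertical_idxs get_vertical_idxs_alt
  have hne : lines.map (fun l => (l.length : Int)) ≠ [] := by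
    simpa using hpre
  split
  next hm => exact absurd ((PySem.List.max?_eq_none_iff _ _).mp hm) hne
  next w hm =>
    conv_rhs => rw [hm]
    simp only
    have hfn : ∀ l ∈ lines, l.length ≤ w.toNat := fun l hl => by
      have := PySem.List.max?_isMax hm ((l.length : Int)) (List.mem_map_of_mem hl)
      omega
    have hcol0 : ∀ j : Nat, w.toNat ≤ j → pvCol lines j = false := by
      intro j hj
      unfold pvCol
      simp only [List.any_eq_false]
      intro l hl
      have := hfn l hl
      simp only [Bool.and_eq_true, decide_eq_true_eq, bne_iff_ne]
      intro ⟨h1, _⟩; omega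
    have hmask := pvMask_spec lines (List.replicate w.toNat false)
      (fun l hl => by simpa using hfn l hl)
    obtain ⟨hmlen, hmget⟩ := hmask
    have hmlen' : (lines.foldl pvMarkLine (List.replicate w.toNat false)).length = w.toNat := by
      simpa using hmlen
    have hwpos : (0 : Int) ≤ w := by
      obtain ⟨y, hy, hyw⟩ : ∃ y ∈ lines.map (fun l => (l.length : Int)), y = w := by
        have := PySem.List.max?_mem hm
        exact ⟨w, this, rfl⟩
      obtain ⟨l, _, rfl⟩ := List.mem_map.mp hy
      subst hyw; positivity
    have hwfn : ((w.toNat : Nat) : Int) = w := Int.toNat_of_nonneg hwpos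
    have hmain := pvLoop_eq_scan lines w.toNat hfn hcol0
      (lines.foldl pvMarkLine (List.replicate w.toNat false)) 0 0 []
      le_rfl (fun _ => Nat.zero_le _) (by omega)
      (fun k hk => by
        rw [hmget k]
        have : k < w.toNat := by rwa [hmlen'] at hk
        simp [List.getD_replicate, this])
    simp only [Nat.cast_zero, show ¬ (0 < 0) by omega, if_neg, if_false] at hmain
    rw [hmain, hwfn]
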